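-- pv_equiv track=rewrite | github.com/hacetheworld/competitive-programming-practices | contests/codeforce/div-3/Codeforces Round #693/A.py | Solution
-- ===== SOURCE A (Python) =====
-- def Solution(w, h, n):
--     count = 1
--     while w & 1 == 0:
--         w = w//2
--         count *= 2
--     while h & 1 == 0:
--         h = h//2
--         count *= 2
--     if count >= n:
--         return "YES"
--     else:
--         return "NO"
-- ===== SOURCE B (Python) =====
-- def Solution(w, h, n):
--     # lowbit(x) = x & -x is 2**(2-adic valuation of x) for any nonzero int,
--     # so the loops' final count is lowbit(w) * lowbit(h).
--     return "YES" if (w & -w) * (h & -h) >= n else "NO"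
-- ===== Notes on version B (the rewrite author's own statement) =====
-- stated objective: simpler
-- what changed: Replaces both factor-stripping while-loops by the closed-form lowbit bit trick: count = (w & -w) * (h & -h), compared to n directly; Pre_ excludes w = 0 or h = 0, where A's while-loop never terminates.
import Mathlib
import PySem

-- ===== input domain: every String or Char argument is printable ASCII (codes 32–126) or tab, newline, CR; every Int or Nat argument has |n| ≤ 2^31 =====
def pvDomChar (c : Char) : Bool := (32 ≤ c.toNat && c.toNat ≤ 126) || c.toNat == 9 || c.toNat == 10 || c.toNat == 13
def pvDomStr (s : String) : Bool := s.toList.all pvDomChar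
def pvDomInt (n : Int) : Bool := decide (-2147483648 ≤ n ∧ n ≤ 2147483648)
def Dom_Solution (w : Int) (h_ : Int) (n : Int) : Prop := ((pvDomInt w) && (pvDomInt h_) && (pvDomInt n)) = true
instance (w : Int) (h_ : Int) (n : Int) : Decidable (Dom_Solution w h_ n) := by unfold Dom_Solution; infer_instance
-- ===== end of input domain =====

-- B replaces A's two factor-stripping while-loops by the closed-form lowbit trick
-- count = (w & -w) * (h & -h); equivalence is claimed for w ≠ 0 and h ≠ 0 (on
-- w = 0 or h = 0 the Python A loops forever).

-- ===== PORT A =====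
-- 'while w & 1 == 0: w = w//2; count *= 2' as structural recursion on |w|;
-- the 'w ≠ 0' conjunct is a totality guard only (Pre_ excludes w = 0, where Python diverges).
def stripA (w : Int) (count : Int) : Int × Int :=
  if h : w ≠ 0 ∧ PySem.Int.band w 1 = 0 then
    stripA (PySem.Int.floordiv w 2) (count * 2)
  else (w, count)
termination_by w.natAbs
decreasing_by
  simp only [PySem.Int.floordiv]
  obtain ⟨hw, he⟩ := h
  have h2 : (2:Int) ∣ w := by
    have := PySem.Int.band_one w
    rw [he] at this
    exact Int.dvd_of_fmod_eq_zero this.symm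
  obtain ⟨a, rfl⟩ := h2
  have ha : a ≠ 0 := by rintro rfl; simp at hw
  have : (2 * a).fdiv 2 = a := by
    rw [Int.mul_fdiv_cancel_left _ (by norm_num)]
  rw [this]
  simp [Int.natAbs_mul]
  omega

def Solution (w : Int) (h_ : Int) (n : Int) : String :=
  let r1 := stripA w 1
  let r2 := stripA h_ r1.2
  if r2.2 ≥ n then "YES" else "NO"

-- ===== PORT B =====
def Solution_alt (w : Int) (h_ : Int) (n : Int) : String :=
  if PySem.Int.band w (-w) * PySem.Int.band h_ (-h_) ≥ n then "YES" else "NO"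

-- ===== PRECONDITION & SPEC =====
-- Pre_ excludes exactly w = 0 or h = 0, on which A's first/second while-loop never terminates.
def Pre_Solution (w : Int) (h_ : Int) (n : Int) : Prop := w ≠ 0 ∧ h_ ≠ 0
instance (w : Int) (h_ : Int) (n : Int) : Decidable (Pre_Solution w h_ n) := by unfold Pre_Solution; infer_instance
def pvWitness_Solution : Int × Int × Int := (12, 20, 16)

def Spec_Solution (w : Int) (h_ : Int) (n : Int) (out : String) : Prop := out = Solution_alt w h_ n
instance (w : Int) (h_ : Int) (n : Int) (out : String) : Decidable (Spec_Solution w h_ n out) := by unfold Spec_Solution; infer_instance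

-- ===== CLAIM (what is proved, stated in full; the proofs are below) =====
def Claim_equal_Solution : Prop := ∀ (w : Int) (h_ : Int) (n : Int), Dom_Solution w h_ n → Pre_Solution w h_ n → Spec_Solution w h_ n (Solution w h_ n)

-- ===== LEMMAS AND PROOFS =====

theorem pv_odd_div (a : Nat) : (a*2+1)/2 = a := by omega

theorem pv_land_odd_even (a b : Nat) : (2*a+1) &&& (2*b) = 2*(a &&& b) := by
  apply Nat.eq_of_testBit_eq
  intro i
  cases i <;> simp [Nat.testBit_succ, Nat.and_div_two, Nat.mul_comm, pv_odd_div]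

theorem pv_land_even_odd (a b : Nat) : (2*a) &&& (2*b+1) = 2*(a &&& b) := by
  apply Nat.eq_of_testBit_eq
  intro i
  cases i <;> simp [Nat.testBit_succ, Nat.and_div_two, Nat.mul_comm, pv_odd_div]

-- the Nat-level lowbit m = m - (m &&& (m-1))
def pvLow (m : Nat) : Nat := m - (m &&& (m-1))

theorem pvLow_odd (k : Nat) : pvLow (2*k+1) = 1 := by
  unfold pvLow
  rw [Nat.add_sub_cancel, pv_land_odd_even k k, Nat.and_self]
  omega

theorem pvLow_even (k : Nat) (hk : k ≠ 0) : pvLow (2*k) = 2 * pvLow k := by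
  unfold pvLow
  have h1 : 2*k - 1 = 2*(k-1)+1 := by omega
  have h2 : (2*k) &&& (2*(k-1)+1) = 2*(k &&& (k-1)) := pv_land_even_odd k (k-1)
  have h3 : k &&& (k-1) ≤ k := Nat.and_le_left
  rw [h1, h2]
  omega

-- band w (-w) computes the Nat lowbit of |w|
theorem pv_band_neg_self (w : Int) (hw : w ≠ 0) :
    PySem.Int.band w (-w) = (pvLow w.natAbs : Int) := by
  unfold PySem.Int.band pvLow
  rcases lt_or_gt_of_ne hw with hneg | hpos
  · have h1 : ¬ (0 ≤ w) := by omega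
    have h2 : (0:Int) ≤ -w := by omega
    simp only [h1, h2, if_true, if_false]
    have e1 : (-w).toNat = w.natAbs := by omega
    have e2 : (-w - 1).toNat = w.natAbs - 1 := by omega
    rw [e1, e2]
  · have h1 : (0:Int) ≤ w := by omega
    have h2 : ¬ ((0:Int) ≤ -w) := by omega
    simp only [h1, h2, if_true, if_false]
    have e1 : w.toNat = w.natAbs := by omega
    have e2 : (-(-w) - 1).toNat = w.natAbs - 1 := by omega
    rw [e1, e2]

-- loop invariant: the count after stripping is count * lowbit
theorem pv_strip_eq (k : Nat) : ∀ (w c : Int), w.natAbs ≤ k → w ≠ 0 →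
    (stripA w c).2 = c * PySem.Int.band w (-w) := by
  induction k with
  | zero => intro w c hk hw; omega
  | succ k ih =>
    intro w c hk hw
    rw [pv_band_neg_self w hw]
    by_cases he : PySem.Int.band w 1 = 0
    · -- even step
      have hm : w.fmod 2 = 0 := by
        have hb := PySem.Int.band_one w
        rw [he] at hb
        simpa [PySem.Int.mod] using hb.symm
      have h2 : (2:Int) ∣ w := Int.dvd_of_fmod_eq_zero hm
      obtain ⟨a, rfl⟩ := h2
      have ha : a ≠ 0 := by rintro rfl; simp at hw
      rw [stripA]
      simp only [hw, he, ne_eq, not_false_eq_true, and_self, dif_pos]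
      have hfd : PySem.Int.floordiv (2*a) 2 = a := by
        simp [PySem.Int.floordiv, Int.mul_fdiv_cancel_left _ (by norm_num : (2:Int) ≠ 0)]
      rw [hfd]
      have hna : a.natAbs ≤ k := by
        have : (2*a).natAbs = 2 * a.natAbs := by simp [Int.natAbs_mul]
        omega
      rw [ih a (c*2) hna ha, pv_band_neg_self a ha]
      have hlow : pvLow (2*a).natAbs = 2 * pvLow a.natAbs := by
        have : (2*a).natAbs = 2 * a.natAbs := by simp [Int.natAbs_mul]
        rw [this]
        exact pvLow_even a.natAbs (by omega)
      rw [hlow]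
      push_cast
      ring
    · -- odd: loop stops
      rw [stripA]
      simp only [he, and_false, dif_neg, not_false_eq_true]
      have hm : w.fmod 2 = 1 := by
        have hb := PySem.Int.band_one w
        have hfe : w.fmod 2 = w % 2 := by
          rw [Int.fmod_eq_emod]; simp
        have h01 : w.fmod 2 = 0 ∨ w.fmod 2 = 1 := by omega
        rcases h01 with h | h
        · exact absurd (by rw [hb]; simpa [PySem.Int.mod] using h) he
        · exact h
      have hodd : ∃ kk, w.natAbs = 2*kk+1 := by
        have h2 : ¬ (2:Int) ∣ w := by
          intro hd
          rw [Int.fmod_eq_zero_of_dvd hd] at hm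
          omega
        have : w.natAbs % 2 = 1 := by
          rcases Nat.even_or_odd w.natAbs with he2 | ho
          · exfalso
            apply h2
            have : (2:Int) ∣ (w.natAbs : Int) := by
              obtain ⟨m, hm2⟩ := he2
              exact ⟨m, by push_cast [hm2]; ring⟩
            rcases Int.natAbs_eq w with hw2 | hw2
            · rw [hw2]; exact this
            · rw [hw2]; exact Dvd.dvd.neg_right this
          · omega
        exact ⟨w.natAbs / 2, by omega⟩
      obtain ⟨kk, hkk⟩ := hodd
      rw [hkk, pvLow_odd]
      simp

-- ===== VERDICT (by name: the statement is the Claim_ definition above) =====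
theorem Solution_spec : Claim_equal_Solution := by
  intro w h_ n _ hpre
  obtain ⟨hw, hh⟩ := hpre
  unfold Spec_Solution Solution Solution_alt
  have h1 : (stripA w 1).2 = 1 * PySem.Int.band w (-w) :=
    pv_strip_eq w.natAbs w 1 le_rfl hw
  have h2 : (stripA h_ (PySem.Int.band w (-w))).2
      = PySem.Int.band w (-w) * PySem.Int.band h_ (-h_) :=
    pv_strip_eq h_.natAbs h_ _ le_rfl hh
  simp only [h1, one_mul, h2]
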